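-- pv_equiv track=rewrite | github.com/HeoSeokYong/BoostCampAlgorithmStudy_LEVEL2_CV11 | week11/Tue/HeoSeokYong_stack.py | solution
-- ===== SOURCE A (Python) =====
-- def solution(s):
--     stack = []
--
--     if len(s) % 2 != 0:
--         return 0
--
--     for w in s:
--         if not stack:
--             stack.append(w)
--         elif stack[-1] == w:
--             stack.pop()
--         else:
--             stack.append(w)
--
--     return 0 if stack else 1
-- ===== SOURCE B (Python) =====
-- def solution(s):
--     t = list(s)
--     while True:
--         for i in range(len(t) - 1):
--             if t[i] == t[i + 1]:
--                 del t[i:i + 2]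
--                 break
--         else:
--             break
--     return 1 if not t else 0
-- ===== Notes on version B (the rewrite author's own statement) =====
-- stated objective: alternative
-- what changed: Replaces the single stack pass (with an odd-length guard) by repeated removal of the first adjacent equal pair until a fixpoint, returning 1 iff nothing remains; correctness rests on confluence of adjacent-pair removal.
import Mathlib
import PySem

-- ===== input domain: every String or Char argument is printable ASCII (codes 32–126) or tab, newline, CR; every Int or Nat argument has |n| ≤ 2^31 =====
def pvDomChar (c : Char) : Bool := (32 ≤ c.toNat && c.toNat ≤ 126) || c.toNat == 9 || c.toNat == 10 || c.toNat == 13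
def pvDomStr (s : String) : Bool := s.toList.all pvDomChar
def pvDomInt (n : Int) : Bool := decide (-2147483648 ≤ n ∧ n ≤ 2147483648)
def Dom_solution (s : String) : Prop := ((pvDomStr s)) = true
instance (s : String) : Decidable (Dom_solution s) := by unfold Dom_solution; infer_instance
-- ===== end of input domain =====

-- B replaces A's single stack pass (and its odd-length guard) by repeated removal of the
-- first adjacent equal pair until no pair remains (return value only; no side effects).

-- ===== PORT A =====
-- one step of A's for-loop body (stack[-1] via pyGet?, pop via dropLast, append at the end)
def solutionStep (stack : List Char) (w : Char) : List Char :=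
  if stack = [] then stack ++ [w]
  else if PySem.List.pyGet? stack (-1) = some w then stack.dropLast
  else stack ++ [w]

def solution (s : String) : Int :=
  if PySem.Int.mod (PySem.Str.len s) 2 ≠ 0 then 0
  else
    let stack := s.toList.foldl solutionStep []
    if stack ≠ [] then 0 else 1

-- ===== PORT B =====
-- the inner for-scan of Source B: find the first i with t[i] == t[i+1] and delete that pair
def findRemove : List Char → Option (List Char)
  | [] => none
  | [_] => none
  | a :: b :: rest => if a = b then some rest else (findRemove (b :: rest)).map (a :: ·)

-- termination measure for the outer loop (cited by collapse's decreasing_by)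
theorem findRemove_length : ∀ {l l' : List Char}, findRemove l = some l' → l'.length + 2 = l.length
  | [], _, h => by simp [findRemove] at h
  | [_], _, h => by simp [findRemove] at h
  | a :: b :: rest, l', h => by
    by_cases hab : a = b
    · simp only [findRemove, if_pos hab, Option.some.injEq] at h
      subst h; simp
    · simp only [findRemove, if_neg hab, Option.map_eq_some_iff] at h
      obtain ⟨l'', h1, h2⟩ := h
      have := findRemove_length h1
      subst h2
      simp only [List.length_cons] at this ⊢
      omega

-- the outer while-loop of Source B
def collapse (l : List Char) : List Char :=
  match h : findRemove l with
  | some l' => collapse l'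
  | none => l
termination_by l.length
decreasing_by have := findRemove_length h; omega

def solution_alt (s : String) : Int :=
  if collapse s.toList = [] then 1 else 0

-- ===== PRECONDITION & SPEC =====
def Spec_solution (s : String) (out : Int) : Prop := out = solution_alt s
instance (s : String) (out : Int) : Decidable (Spec_solution s out) := by unfold Spec_solution; infer_instance

-- ===== CLAIM (what is proved, stated in full; the proofs are below) =====
def Claim_equal_solution : Prop := ∀ (s : String), Dom_solution s → Spec_solution s (solution s)

-- ===== LEMMAS AND PROOFS =====

theorem collapse_some {l l' : List Char} (h : findRemove l = some l') :
    collapse l = collapse l' := by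
  rw [collapse]; split <;> simp_all

theorem collapse_none {l : List Char} (h : findRemove l = none) : collapse l = l := by
  rw [collapse]; split <;> simp_all

-- A's stack, represented with its top at the head
def stepR (st : List Char) (w : Char) : List Char :=
  match st with
  | [] => [w]
  | a :: t => if a = w then t else w :: a :: t

theorem solutionStep_rev (rst : List Char) (w : Char) :
    solutionStep rst.reverse w = (stepR rst w).reverse := by
  cases rst with
  | nil => simp [solutionStep, stepR]
  | cons a t =>
    simp only [List.reverse_cons, stepR]
    by_cases haw : a = w
    · simp [solutionStep, haw, PySem.List.pyGet?_neg_one_append_singleton]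
    · simp [solutionStep, PySem.List.pyGet?_neg_one_append_singleton, haw]

theorem foldl_solutionStep_rev (l : List Char) (rst : List Char) :
    l.foldl solutionStep rst.reverse = (l.foldl stepR rst).reverse := by
  induction l generalizing rst with
  | nil => rfl
  | cons w l ih => simp only [List.foldl_cons, solutionStep_rev, ih]

theorem stepR_chain {st : List Char} (h : st.IsChain (· ≠ ·)) (w : Char) :
    (stepR st w).IsChain (· ≠ ·) := by
  cases st with
  | nil => simp [stepR]
  | cons a t =>
    by_cases haw : a = w
    · simp only [stepR, if_pos haw]; exact h.tail
    · simpa [stepR, haw, Ne.symm haw] using h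

theorem foldl_stepR_pair {st : List Char} (h : st.IsChain (· ≠ ·)) (c : Char)
    (rest : List Char) : (c :: c :: rest).foldl stepR st = rest.foldl stepR st := by
  have : stepR (stepR st c) c = st := by
    cases st with
    | nil => simp [stepR]
    | cons a t =>
      by_cases hac : a = c
      · subst hac
        simp only [stepR, if_pos rfl]
        cases t with
        | nil => simp [stepR]
        | cons b t' =>
          have hab : a ≠ b := (List.isChain_cons_cons.mp h).1
          simp [stepR, Ne.symm hab]
      · simp [stepR, hac]
  simp [List.foldl_cons, this]

theorem findRemove_some_foldl : ∀ {l l' : List Char}, findRemove l = some l' →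
    ∀ st : List Char, st.IsChain (· ≠ ·) → l.foldl stepR st = l'.foldl stepR st
  | [], _, h => by simp [findRemove] at h
  | [_], _, h => by simp [findRemove] at h
  | a :: b :: rest, l', h => by
    intro st hst
    by_cases hab : a = b
    · simp only [findRemove, if_pos hab, Option.some.injEq] at h
      subst hab; subst h
      exact foldl_stepR_pair hst a rest
    · simp only [findRemove, if_neg hab, Option.map_eq_some_iff] at h
      obtain ⟨l'', h1, h2⟩ := h
      subst h2
      simp only [List.foldl_cons]
      exact findRemove_some_foldl h1 (stepR st a) (stepR_chain hst a)

theorem findRemove_none_chain : ∀ {l : List Char}, findRemove l = none → l.IsChain (· ≠ ·)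
  | [], _ => by simp
  | [_], _ => List.isChain_singleton _
  | a :: b :: rest, h => by
    by_cases hab : a = b
    · simp [findRemove, hab] at h
    · simp only [findRemove, if_neg hab, Option.map_eq_none_iff] at h
      exact List.isChain_cons_cons.mpr ⟨hab, findRemove_none_chain h⟩

theorem foldl_stepR_of_chain : ∀ (l : List Char), l.IsChain (· ≠ ·) →
    ∀ st : List Char, (∀ c, l.head? = some c → st.head? ≠ some c) →
    l.foldl stepR st = l.reverse ++ st := by
  intro l
  induction l with
  | nil => intro _ st _; simp
  | cons w rest ih =>
    intro hch st hhd
    have hstep : stepR st w = w :: st := by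
      cases st with
      | nil => rfl
      | cons a t =>
        have : a ≠ w := fun he => hhd w rfl (by simp [he])
        simp [stepR, this]
    simp only [List.foldl_cons, hstep]
    rw [ih hch.tail (w :: st) ?_]
    · simp
    · intro c hc
      cases rest with
      | nil => simp at hc
      | cons d t =>
        simp only [List.head?, Option.some.injEq] at hc
        subst hc
        simpa using (List.isChain_cons_cons.mp hch).1

theorem foldl_stepR_eq_collapse : ∀ (n : Nat) (l : List Char), l.length = n →
    l.foldl stepR [] = (collapse l).reverse := by
  intro n
  induction n using Nat.strong_induction_on with
  | _ n ih =>
    intro l hn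
    cases hfr : findRemove l with
    | some l' =>
      have hlen := findRemove_length hfr
      rw [findRemove_some_foldl hfr [] (by simp), collapse_some hfr]
      exact ih l'.length (by omega) l' rfl
    | none =>
      rw [collapse_none hfr, foldl_stepR_of_chain l (findRemove_none_chain hfr) [] (by simp)]
      simp

theorem collapse_length_mod : ∀ (n : Nat) (l : List Char), l.length = n →
    (collapse l).length % 2 = l.length % 2 := by
  intro n
  induction n using Nat.strong_induction_on with
  | _ n ih =>
    intro l hn
    cases hfr : findRemove l with
    | some l' =>
      have hlen := findRemove_length hfr
      rw [collapse_some hfr]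
      have := ih l'.length (by omega) l' rfl
      omega
    | none => rw [collapse_none hfr]

-- ===== VERDICT (by name: the statement is the Claim_ definition above) =====
theorem solution_spec : Claim_equal_solution := by
  intro s _
  unfold Spec_solution solution solution_alt
  have hlen : PySem.Str.len s = (s.toList.length : Int) := by
    rw [PySem.Str.len_eq, String.length_toList]
  by_cases hodd : s.toList.length % 2 = 1
  · have hA : PySem.Int.mod (PySem.Str.len s) 2 ≠ 0 := by
      rw [hlen, PySem.Int.mod_eq_emod_of_pos (by norm_num)]; omega
    rw [if_pos hA]
    have h2 : (collapse s.toList).length % 2 = 1 := by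
      rw [collapse_length_mod s.toList.length s.toList rfl]; exact hodd
    have hne : collapse s.toList ≠ [] := by
      intro he; rw [he] at h2; simp at h2
    rw [if_neg hne]
  · have hA : ¬ PySem.Int.mod (PySem.Str.len s) 2 ≠ 0 := by
      rw [hlen, PySem.Int.mod_eq_emod_of_pos (by norm_num)]; omega
    rw [if_neg hA]
    have hstack : s.toList.foldl solutionStep [] = collapse s.toList := by
      have h0 := foldl_solutionStep_rev s.toList []
      simp only [List.reverse_nil] at h0
      rw [h0, foldl_stepR_eq_collapse s.toList.length s.toList rfl, List.reverse_reverse]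
    simp only [hstack]
    by_cases hc : collapse s.toList = []
    · simp [hc]
    · simp [hc]
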